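-- pv_equiv track=rewrite | github.com/elymatos/pytorch | schemas/gcn_training.py | replace_known_chunks
-- ===== SOURCE A (Python) =====
-- def replace_known_chunks(sentence, schema_defs):
--     """Replace sequences in sentence using known schema definitions, allowing overlapping matches."""
--     matches = []
--     for i in range(len(sentence)):
--         for schema, fields in schema_defs.items():
--             length = len(fields)
--             if i + length <= len(sentence) and tuple(sentence[i:i + length]) == tuple(fields):
--                 matches.append((i, i + length, schema))
--
--     # Sort matches by start index
--     matches.sort()
--
--     # Build new sentence with replacements
--     new_sentence = []
--     i = 0
--     while i < len(sentence):
--         found = False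
--         for start, end, schema in matches:
--             if i == start:
--                 new_sentence.append(schema)
--                 i = end
--                 found = True
--                 break
--         if not found:
--             new_sentence.append(sentence[i])
--             i += 1
--     return new_sentence
-- ===== SOURCE B (Python) =====
-- def replace_known_chunks(sentence, schema_defs):
--     """Replace sequences in sentence using known schema definitions, allowing overlapping matches."""
--     # best schema name per exact field tuple (smallest name wins, as A's sort tie-break does)
--     best = {}
--     for schema, fields in schema_defs.items():
--         key = tuple(fields)
--         cur = best.get(key)
--         if cur is None or schema < cur:
--             best[key] = schema
--     lengths = sorted({len(fields) for fields in schema_defs.values()})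
--     n = len(sentence)
--     new_sentence = []
--     i = 0
--     while i < n:
--         repl = None
--         for L in lengths:
--             if i + L <= n:
--                 s = best.get(tuple(sentence[i:i + L]))
--                 if s is not None:
--                     repl = (s, i + L)
--                     break
--         if repl is None:
--             new_sentence.append(sentence[i])
--             i += 1
--         else:
--             new_sentence.append(repl[0])
--             i = repl[1]
--     return new_sentence
-- ===== Notes on version B (the rewrite author's own statement) =====
-- stated objective: faster
-- what changed: Instead of scanning every schema at every position to build and sort a global match list, B builds one hash map from field-tuple to the lexicographically smallest schema name plus a sorted list of the distinct field lengths, and at each position probes the map once per distinct length (ascending, so the first hit is A's sorted-matches winner).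
import Mathlib
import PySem

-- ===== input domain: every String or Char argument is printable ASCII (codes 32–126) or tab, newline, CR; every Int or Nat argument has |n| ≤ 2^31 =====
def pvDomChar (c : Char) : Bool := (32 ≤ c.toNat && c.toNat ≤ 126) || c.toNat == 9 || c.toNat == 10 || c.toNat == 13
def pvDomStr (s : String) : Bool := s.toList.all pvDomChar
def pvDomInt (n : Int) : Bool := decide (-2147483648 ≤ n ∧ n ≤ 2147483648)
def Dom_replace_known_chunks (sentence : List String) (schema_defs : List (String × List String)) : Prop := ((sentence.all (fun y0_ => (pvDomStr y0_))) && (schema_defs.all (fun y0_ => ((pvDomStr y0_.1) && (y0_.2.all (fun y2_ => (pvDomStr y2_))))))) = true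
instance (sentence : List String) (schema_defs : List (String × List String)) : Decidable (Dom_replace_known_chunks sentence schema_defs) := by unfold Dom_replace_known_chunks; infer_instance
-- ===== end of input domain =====

-- B replaces A's per-position scan over all schemas (building and sorting a global match list)
-- by one hash map field-tuple → smallest schema name plus the sorted distinct field lengths,
-- probed once per distinct length at each position (objective: faster).

-- ===== PORT A =====
-- the key Python's tuple sort orders (start, end, schema) by: lexicographic on the triple
def pvKeyA (m : Nat × Nat × String) : Lex (Nat × Lex (Nat × String)) :=
  toLex (m.1, toLex (m.2.1, m.2.2))

-- the two nested 'for' loops appending (i, i+length, schema) whenever the slice equals fields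
def pvMatchesA (sentence : List String) (schema_defs : List (String × List String)) :
    List (Nat × Nat × String) :=
  (List.range sentence.length).foldl (fun acc i =>
    schema_defs.foldl (fun acc p =>
      if i + p.2.length ≤ sentence.length ∧
          PySem.List.slice sentence (some (i : Int)) (some ((i : Int) + (p.2.length : Int))) = p.2
      then acc ++ [(i, i + p.2.length, p.1)] else acc) acc) []

-- the 'while i < len(sentence)' loop; fuel only makes the recursion structural
def pvLoopA (sentence : List String) (ms : List (Nat × Nat × String)) :
    Nat → Nat → List String → List String
  | 0, _, acc => acc
  | fuel + 1, i, acc =>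
    if h : i < sentence.length then
      match ms.find? (fun m => m.1 == i) with
      | some m => pvLoopA sentence ms fuel m.2.1 (acc ++ [m.2.2])
      | none => pvLoopA sentence ms fuel (i + 1) (acc ++ [sentence[i]])
    else acc

def replace_known_chunks (sentence : List String) (schema_defs : List (String × List String)) :
    List String :=
  pvLoopA sentence (PySem.List.sorted (pvMatchesA sentence schema_defs) pvKeyA false)
    sentence.length 0 []

-- ===== PORT B =====
-- best[tuple(fields)] = smallest schema name with those fields
def pvBestB (schema_defs : List (String × List String)) : PySem.Dict (List String) String :=
  schema_defs.foldl (fun d p =>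
    match d.get? p.2 with
    | none => d.insert p.2 p.1
    | some cur => if p.1 < cur then d.insert p.2 p.1 else d) PySem.Dict.empty

-- lengths = sorted({len(fields) for fields in schema_defs.values()})
def pvLengthsB (schema_defs : List (String × List String)) : List Nat :=
  PySem.List.sorted (PySem.Set.ofList (schema_defs.map (fun p => p.2.length))) (fun x => x) false

-- the inner 'for L in lengths' probe loop
def pvScanB (sentence : List String) (best : PySem.Dict (List String) String) (i : Nat) :
    List Nat → Option (String × Nat)
  | [] => none
  | L :: rest =>
    if i + L ≤ sentence.length then
      match best.get? (PySem.List.slice sentence (some (i : Int)) (some ((i : Int) + (L : Int)))) with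
      | some s => some (s, i + L)
      | none => pvScanB sentence best i rest
    else pvScanB sentence best i rest

-- the 'while i < n' loop of B; fuel only makes the recursion structural
def pvLoopB (sentence : List String) (best : PySem.Dict (List String) String)
    (lengths : List Nat) : Nat → Nat → List String → List String
  | 0, _, acc => acc
  | fuel + 1, i, acc =>
    if h : i < sentence.length then
      match pvScanB sentence best i lengths with
      | some (s, j) => pvLoopB sentence best lengths fuel j (acc ++ [s])
      | none => pvLoopB sentence best lengths fuel (i + 1) (acc ++ [sentence[i]])
    else acc

def replace_known_chunks_alt (sentence : List String)
    (schema_defs : List (String × List String)) : List String :=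
  pvLoopB sentence (pvBestB schema_defs) (pvLengthsB schema_defs) sentence.length 0 []

-- ===== PRECONDITION & SPEC =====
-- No Pre_: the ports agree on every input (where Python A loops forever — an empty fields
-- list with a nonempty sentence — both Pythons loop forever alike; the fuelled ports still agree).
def Spec_replace_known_chunks (sentence : List String) (schema_defs : List (String × List String)) (out : List String) : Prop := out = replace_known_chunks_alt sentence schema_defs
instance (sentence : List String) (schema_defs : List (String × List String)) (out : List String) : Decidable (Spec_replace_known_chunks sentence schema_defs out) := by unfold Spec_replace_known_chunks; infer_instance

-- ===== CLAIM (what is proved, stated in full; the proofs are below) =====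
def Claim_equal_replace_known_chunks : Prop := ∀ (sentence : List String) (schema_defs : List (String × List String)), Dom_replace_known_chunks sentence schema_defs → Spec_replace_known_chunks sentence schema_defs (replace_known_chunks sentence schema_defs)

-- ===== LEMMAS AND PROOFS =====

-- schema names carried by fields list f in schema_defs
def pvKeysIn (schema_defs : List (String × List String)) (f : List String) : List String :=
  schema_defs.filterMap (fun p => if p.2 = f then some p.1 else none)

-- running minimum exactly as pvBestB maintains it
def pvMFold : Option String → List String → Option String
  | o, [] => o
  | none, s :: t => pvMFold (some s) t
  | some c, s :: t => pvMFold (some (if s < c then s else c)) t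

lemma mem_keysIn {schema_defs : List (String × List String)} {f : List String} {s : String} :
    s ∈ pvKeysIn schema_defs f ↔ (s, f) ∈ schema_defs := by
  simp only [pvKeysIn, List.mem_filterMap]
  constructor
  · rintro ⟨⟨a, b⟩, hm, h⟩
    by_cases hb : b = f
    · subst hb
      simp at h
      subst h; exact hm
    · simp [hb] at h
  · intro hm
    exact ⟨(s, f), hm, by simp⟩

lemma bestB_aux (l : List (String × List String)) :
    ∀ (d : PySem.Dict (List String) String) (f : List String),
      (l.foldl (fun d p =>
        match d.get? p.2 with
        | none => d.insert p.2 p.1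
        | some cur => if p.1 < cur then d.insert p.2 p.1 else d) d).get? f =
      pvMFold (d.get? f) (pvKeysIn l f) := by
  induction l with
  | nil => intro d f; rfl
  | cons p t ih =>
    intro d f
    simp only [List.foldl_cons]
    rw [ih]
    by_cases hpf : p.2 = f
    · subst hpf
      have hk : pvKeysIn (p :: t) p.2 = p.1 :: pvKeysIn t p.2 := by simp [pvKeysIn]
      rw [hk]
      cases hdf : d.get? p.2 with
      | none =>
        show pvMFold ((d.insert p.2 p.1).get? p.2) _ = _
        rw [PySem.Dict.get?_insert_self]
        rfl
      | some c =>
        show pvMFold ((if p.1 < c then d.insert p.2 p.1 else d).get? p.2) _ = _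
        by_cases hc : p.1 < c
        · rw [if_pos hc, PySem.Dict.get?_insert_self]
          show pvMFold (some p.1) _ = pvMFold (some (if p.1 < c then p.1 else c)) _
          rw [if_pos hc]
        · rw [if_neg hc, hdf]
          show pvMFold (some c) _ = pvMFold (some (if p.1 < c then p.1 else c)) _
          rw [if_neg hc]
    · have hk : pvKeysIn (p :: t) f = pvKeysIn t f := by simp [pvKeysIn, hpf]
      rw [hk]
      congr 1
      cases hdf : d.get? p.2 with
      | none =>
        show (d.insert p.2 p.1).get? f = d.get? f
        exact PySem.Dict.get?_insert_of_ne d p.1 (fun h => hpf h.symm)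
      | some c =>
        show (if p.1 < c then d.insert p.2 p.1 else d).get? f = d.get? f
        by_cases hc : p.1 < c
        · rw [if_pos hc]; exact PySem.Dict.get?_insert_of_ne d p.1 (fun h => hpf h.symm)
        · rw [if_neg hc]

lemma bestB_get? (schema_defs : List (String × List String)) (f : List String) :
    (pvBestB schema_defs).get? f = pvMFold none (pvKeysIn schema_defs f) := by
  unfold pvBestB
  rw [bestB_aux]
  rw [PySem.Dict.get?_empty]

lemma mfold_some (t : List String) (c : String) :
    pvMFold (some c) t = some (t.foldl min c) := by
  induction t generalizing c with
  | nil => rfl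
  | cons s t ih =>
    show pvMFold (some (if s < c then s else c)) t = some (List.foldl min c (s :: t))
    rw [ih]
    simp only [List.foldl_cons]
    congr 2
    rcases lt_or_ge s c with h | h
    · simp [min_def, h, not_le.mpr h]
    · simp [not_lt.mpr h, h]

lemma bestB_some_min {schema_defs : List (String × List String)} {f : List String} {s : String}
    (h : (pvBestB schema_defs).get? f = some s) :
    s ∈ pvKeysIn schema_defs f ∧ ∀ s' ∈ pvKeysIn schema_defs f, s ≤ s' := by
  rw [bestB_get?] at h
  cases hk : pvKeysIn schema_defs f with
  | nil => rw [hk] at h; exact absurd h (by simp [pvMFold])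
  | cons s0 t =>
    rw [hk] at h
    have h' : pvMFold (some s0) t = some s := h
    rw [mfold_some] at h'
    have hs : s = t.foldl min s0 := (Option.some.injEq _ _ ▸ h').symm
    constructor
    · rcases PySem.List.foldl_min_mem t s0 with h1 | h1
      · rw [hs, h1]; exact List.mem_cons_self ..
      · rw [hs]; exact List.mem_cons_of_mem _ h1
    · intro s' hs'
      rcases List.mem_cons.mp hs' with rfl | h1
      · rw [hs]; exact (PySem.List.foldl_min_le t s').1
      · rw [hs]; exact (PySem.List.foldl_min_le t s0).2 _ h1

lemma bestB_eq_some_of_min {schema_defs : List (String × List String)} {f : List String} {s : String}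
    (hmem : s ∈ pvKeysIn schema_defs f) (hmin : ∀ s' ∈ pvKeysIn schema_defs f, s ≤ s') :
    (pvBestB schema_defs).get? f = some s := by
  rw [bestB_get?]
  cases hk : pvKeysIn schema_defs f with
  | nil => rw [hk] at hmem; cases hmem
  | cons s0 t =>
    rw [hk] at hmem hmin
    show pvMFold (some s0) t = some s
    rw [mfold_some]
    congr 1
    apply le_antisymm
    · rcases List.mem_cons.mp hmem with rfl | h1
      · exact (PySem.List.foldl_min_le t s).1
      · exact (PySem.List.foldl_min_le t s0).2 _ h1
    · rcases PySem.List.foldl_min_mem t s0 with h1 | h1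
      · rw [h1]; exact hmin s0 (List.mem_cons_self ..)
      · exact hmin _ (List.mem_cons_of_mem _ h1)

lemma matchesA_eq (sentence : List String) (schema_defs : List (String × List String)) :
    pvMatchesA sentence schema_defs =
      (List.range sentence.length).flatMap (fun i =>
        (schema_defs.filter (fun p => decide (i + p.2.length ≤ sentence.length ∧
          PySem.List.slice sentence (some (i : Int)) (some ((i : Int) + (p.2.length : Int))) = p.2))).map
          (fun p => (i, i + p.2.length, p.1))) := by
  unfold pvMatchesA
  have h1 : (fun (acc : List (Nat × Nat × String)) (i : Nat) =>
      schema_defs.foldl (fun acc p =>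
        if i + p.2.length ≤ sentence.length ∧
            PySem.List.slice sentence (some (i : Int)) (some ((i : Int) + (p.2.length : Int))) = p.2
        then acc ++ [(i, i + p.2.length, p.1)] else acc) acc)
      = (fun acc i => acc ++
          (schema_defs.filter (fun p => decide (i + p.2.length ≤ sentence.length ∧
            PySem.List.slice sentence (some (i : Int)) (some ((i : Int) + (p.2.length : Int))) = p.2))).map
            (fun p => (i, i + p.2.length, p.1))) := by
    funext acc i
    exact PySem.List.foldl_append_ite _ _ _ _
  rw [h1, PySem.List.foldl_append_eq_flatMap]
  simp

lemma mem_matchesA {sentence : List String} {schema_defs : List (String × List String)}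
    {m : Nat × Nat × String} :
    m ∈ pvMatchesA sentence schema_defs ↔
      ∃ i, i < sentence.length ∧ ∃ p ∈ schema_defs,
        (i + p.2.length ≤ sentence.length ∧
          PySem.List.slice sentence (some (i : Int)) (some ((i : Int) + (p.2.length : Int))) = p.2) ∧
        m = (i, i + p.2.length, p.1) := by
  rw [matchesA_eq]
  simp only [List.mem_flatMap, List.mem_map, List.mem_filter, List.mem_range, decide_eq_true_eq]
  constructor
  · rintro ⟨i, hi, p, ⟨hp, hc⟩, hm⟩
    exact ⟨i, hi, p, hp, hc, hm.symm⟩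
  · rintro ⟨i, hi, p, hp, hc, hm⟩
    exact ⟨i, hi, p, ⟨hp, hc⟩, hm.symm⟩

lemma find?_pairwise_min {α : Type} {R : α → α → Prop} {l : List α} {p : α → Bool} {x : α}
    (hp : l.Pairwise R) (h : l.find? p = some x) :
    ∀ y ∈ l, p y = true → x = y ∨ R x y := by
  induction l with
  | nil => simp at h
  | cons a t ih =>
    rcases List.pairwise_cons.mp hp with ⟨ha, ht⟩
    by_cases hpa : p a
    · rw [List.find?_cons_of_pos hpa] at h
      cases h
      intro y hy _
      rcases List.mem_cons.mp hy with rfl | hyt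
      · exact Or.inl rfl
      · exact Or.inr (ha y hyt)
    · rw [List.find?_cons_of_neg hpa] at h
      intro y hy hpy
      rcases List.mem_cons.mp hy with rfl | hyt
      · exact absurd hpy hpa
      · exact ih ht h y hyt hpy

lemma mem_lengthsB {schema_defs : List (String × List String)} {L : Nat} :
    L ∈ pvLengthsB schema_defs ↔ ∃ p ∈ schema_defs, p.2.length = L := by
  unfold pvLengthsB
  rw [PySem.List.mem_sorted, PySem.Set.mem_ofList]
  simp only [List.mem_map]

lemma lengthsB_pairwise (schema_defs : List (String × List String)) :
    (pvLengthsB schema_defs).Pairwise (· < ·) := by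
  have hle := PySem.List.sorted_pairwise
    (PySem.Set.ofList (schema_defs.map (fun p => p.2.length))) (fun x => x)
  have hnd : (pvLengthsB schema_defs).Nodup :=
    (PySem.List.sorted_perm _ _ _).symm.nodup
      (PySem.Set.nodup_ofList (schema_defs.map (fun p => p.2.length)))
  exact (hle.and hnd).imp (fun h => lt_of_le_of_ne h.1 h.2)

lemma scanB_eq_none {sentence : List String} {best : PySem.Dict (List String) String} {i : Nat}
    {ls : List Nat}
    (h : ∀ L ∈ ls, i + L ≤ sentence.length →
      best.get? (PySem.List.slice sentence (some (i : Int)) (some ((i : Int) + (L : Int)))) = none) :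
    pvScanB sentence best i ls = none := by
  induction ls with
  | nil => rfl
  | cons L rest ih =>
    unfold pvScanB
    by_cases hL : i + L ≤ sentence.length
    · rw [if_pos hL, h L (List.mem_cons_self ..) hL]
      exact ih (fun L' h1 h2 => h L' (List.mem_cons_of_mem _ h1) h2)
    · rw [if_neg hL]
      exact ih (fun L' h1 h2 => h L' (List.mem_cons_of_mem _ h1) h2)

lemma scanB_eq_some {sentence : List String} {best : PySem.Dict (List String) String} {i L : Nat}
    {v : String} {ls : List Nat} (hp : ls.Pairwise (· < ·)) (hmem : L ∈ ls)
    (hle : i + L ≤ sentence.length)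
    (hget : best.get? (PySem.List.slice sentence (some (i : Int)) (some ((i : Int) + (L : Int)))) = some v)
    (hprev : ∀ L' ∈ ls, L' < L → i + L' ≤ sentence.length →
      best.get? (PySem.List.slice sentence (some (i : Int)) (some ((i : Int) + (L' : Int)))) = none) :
    pvScanB sentence best i ls = some (v, i + L) := by
  induction ls with
  | nil => cases hmem
  | cons L0 rest ih =>
    rcases List.pairwise_cons.mp hp with ⟨hlt, hrest⟩
    rcases List.mem_cons.mp hmem with rfl | hmemr
    · unfold pvScanB
      rw [if_pos hle, hget]
    · have hL0 : L0 < L := hlt L hmemr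
      unfold pvScanB
      by_cases h0 : i + L0 ≤ sentence.length
      · rw [if_pos h0, hprev L0 (List.mem_cons_self ..) hL0 h0]
        exact ih hrest hmemr (fun L' hm hl hn => hprev L' (List.mem_cons_of_mem _ hm) hl hn)
      · rw [if_neg h0]
        exact ih hrest hmemr (fun L' hm hl hn => hprev L' (List.mem_cons_of_mem _ hm) hl hn)

lemma pick_eq (sentence : List String) (schema_defs : List (String × List String)) (i : Nat)
    (hi : i < sentence.length) :
    Option.map (fun m : Nat × Nat × String => (m.2.2, m.2.1))
        ((PySem.List.sorted (pvMatchesA sentence schema_defs) pvKeyA false).find? (fun m => m.1 == i)) =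
      pvScanB sentence (pvBestB schema_defs) i (pvLengthsB schema_defs) := by
  have hperm := PySem.List.sorted_perm (pvMatchesA sentence schema_defs) pvKeyA false
  have hpair := PySem.List.sorted_pairwise (pvMatchesA sentence schema_defs) pvKeyA
  have hmk : ∀ (s' : String) (L' : Nat), i + L' ≤ sentence.length →
      (s', PySem.List.slice sentence (some (i : Int)) (some ((i : Int) + (L' : Int)))) ∈ schema_defs →
      ((i, i + L', s') : Nat × Nat × String) ∈ pvMatchesA sentence schema_defs := by
    intro s' L' hle' hsd
    have hsl' := PySem.List.slice_natCast_add sentence i L'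
    have hlen' : ((sentence.drop i).take L').length = L' := by
      simp only [List.length_take, List.length_drop]; omega
    apply mem_matchesA.mpr
    refine ⟨i, hi, (s', (sentence.drop i).take L'), hsl' ▸ hsd, ⟨?_, ?_⟩, ?_⟩
    · show i + ((sentence.drop i).take L').length ≤ sentence.length
      rw [hlen']; exact hle'
    · show PySem.List.slice sentence (some (i : Int))
          (some ((i : Int) + ((((sentence.drop i).take L').length : Nat) : Int))) =
        (sentence.drop i).take L'
      rw [hlen']; exact hsl'
    · show ((i, i + L', s') : Nat × Nat × String) = (i, i + ((sentence.drop i).take L').length, s')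
      rw [hlen']
  cases hfind : (PySem.List.sorted (pvMatchesA sentence schema_defs) pvKeyA false).find?
      (fun m => m.1 == i) with
  | none =>
    simp only [Option.map_none]
    symm
    apply scanB_eq_none
    intro L hL hle
    by_contra hne
    obtain ⟨s, hs⟩ := Option.ne_none_iff_exists'.mp hne
    obtain ⟨hmem, -⟩ := bestB_some_min hs
    have hsd := mem_keysIn.mp hmem
    have hmm := hmk s L hle hsd
    have hnone := List.find?_eq_none.mp hfind (i, i + L, s) (hperm.symm.mem_iff.mp hmm)
    simp at hnone
  | some m =>
    have hmem_ms : m ∈ pvMatchesA sentence schema_defs :=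
      hperm.mem_iff.mp (List.mem_of_find?_eq_some hfind)
    obtain ⟨i0, hi0, p, hpd, ⟨hcle, hceq⟩, hm⟩ := mem_matchesA.mp hmem_ms
    have hieq : m.1 = i := by simpa using List.find?_some hfind
    subst hm
    obtain rfl : i0 = i := hieq
    have hmin := find?_pairwise_min hpair hfind
    have hcmp : ∀ (s' : String) (L' : Nat), i0 + L' ≤ sentence.length →
        (s', PySem.List.slice sentence (some (i0 : Int)) (some ((i0 : Int) + (L' : Int)))) ∈ schema_defs →
        (i0 + p.2.length < i0 + L') ∨ (i0 + p.2.length = i0 + L' ∧ p.1 ≤ s') := by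
      intro s' L' hle' hsd
      have hy := hmk s' L' hle' hsd
      have hor := hmin (i0, i0 + L', s') (hperm.symm.mem_iff.mp hy) (by simp)
      rcases hor with heq | hle2
      · have h1 : i0 + p.2.length = i0 + L' := congrArg (fun t => t.2.1) heq
        have h2 : p.1 = s' := congrArg (fun t => t.2.2) heq
        exact Or.inr ⟨h1, h2.le⟩
      · rcases Prod.Lex.le_iff.mp hle2 with h1 | ⟨-, h2⟩
        · exact absurd h1 (lt_irrefl i0)
        · rcases Prod.Lex.le_iff.mp h2 with h3 | ⟨h3, h4⟩
          · exact Or.inl h3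
          · exact Or.inr ⟨h3, h4⟩
    simp only [Option.map_some]
    symm
    show pvScanB sentence (pvBestB schema_defs) i0 (pvLengthsB schema_defs) =
      some (p.1, i0 + p.2.length)
    apply scanB_eq_some (lengthsB_pairwise schema_defs)
        (mem_lengthsB.mpr ⟨p, hpd, rfl⟩) hcle
    · rw [hceq]
      apply bestB_eq_some_of_min
      · exact mem_keysIn.mpr (by simpa using hpd)
      · intro s' hs'
        have hsd' : (s', p.2) ∈ schema_defs := mem_keysIn.mp hs'
        have := hcmp s' p.2.length hcle (by rw [hceq]; exact hsd')
        rcases this with h1 | ⟨-, h2⟩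
        · exact absurd h1 (lt_irrefl _)
        · exact h2
    · intro L' hL'mem hlt hle'
      by_contra hne
      obtain ⟨s'', hs''⟩ := Option.ne_none_iff_exists'.mp hne
      obtain ⟨hmem'', -⟩ := bestB_some_min hs''
      have hsd'' := mem_keysIn.mp hmem''
      rcases hcmp s'' L' hle' hsd'' with h1 | ⟨h1, -⟩ <;> omega

lemma loop_eq (sentence : List String) (schema_defs : List (String × List String)) :
    ∀ (fuel i : Nat) (acc : List String),
      pvLoopA sentence (PySem.List.sorted (pvMatchesA sentence schema_defs) pvKeyA false) fuel i acc =
      pvLoopB sentence (pvBestB schema_defs) (pvLengthsB schema_defs) fuel i acc := by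
  intro fuel
  induction fuel with
  | zero => intro i acc; rfl
  | succ fuel ih =>
    intro i acc
    unfold pvLoopA pvLoopB
    by_cases hi : i < sentence.length
    · rw [dif_pos hi, dif_pos hi]
      have hpick := pick_eq sentence schema_defs i hi
      cases hfind : (PySem.List.sorted (pvMatchesA sentence schema_defs) pvKeyA false).find?
          (fun m => m.1 == i) with
      | none =>
        rw [hfind] at hpick
        simp only [Option.map_none] at hpick
        rw [← hpick]
        exact ih (i + 1) (acc ++ [sentence[i]])
      | some m =>
        rw [hfind] at hpick
        simp only [Option.map_some] at hpick
        rw [← hpick]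
        exact ih m.2.1 (acc ++ [m.2.2])
    · rw [dif_neg hi, dif_neg hi]

-- ===== VERDICT (by name: the statement is the Claim_ definition above) =====
theorem replace_known_chunks_spec : Claim_equal_replace_known_chunks := by
  intro sentence schema_defs _
  unfold Spec_replace_known_chunks replace_known_chunks replace_known_chunks_alt
  exact loop_eq sentence schema_defs sentence.length 0 []
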